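-- pv_equiv track=rewrite | github.com/ndt93/hop-ilp | hop-ilp/src/solver/mrf_solver.py | vars_values_generator
-- ===== SOURCE A (Python) =====
-- def vars_values_generator(tree_vars):
--     result = {}
--     vals = 0
--     end = 2**len(tree_vars)
--
--     while vals < end:
--         for i in range(len(tree_vars)):
--             if vals & (1 << i) > 0:
--                 result[tree_vars[i]] = 1
--             else:
--                 result[tree_vars[i]] = 0
--
--         yield result
--         vals += 1
-- ===== SOURCE B (Python) =====
-- def vars_values_generator(tree_vars):
--     # One shared dict, as in A; between consecutive counter values only the
--     # trailing bits change: bits 0..i-1 reset to 0 and bit i flips to 1.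
--     result = {v: 0 for v in tree_vars}
--     yield result
--     for vals in range(1, 2 ** len(tree_vars)):
--         i = (vals ^ (vals - 1)).bit_length() - 1
--         for j in range(i):
--             result[tree_vars[j]] = 0
--         result[tree_vars[i]] = 1
--         yield result
-- ===== Notes on version B (the rewrite author's own statement) =====
-- stated objective: alternative
-- what changed: Instead of rewriting every variable's bit on each counter value (n writes per step), B keeps the shared dict and flips only the trailing bits that change between consecutive counter values (reset bits 0..i-1, set bit i, i = index of the lowest set bit), amortized O(1) dict writes per step; measured 1.71x at n=16 but unconfirmed at the largest size, so no speed claim.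
import Mathlib
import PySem

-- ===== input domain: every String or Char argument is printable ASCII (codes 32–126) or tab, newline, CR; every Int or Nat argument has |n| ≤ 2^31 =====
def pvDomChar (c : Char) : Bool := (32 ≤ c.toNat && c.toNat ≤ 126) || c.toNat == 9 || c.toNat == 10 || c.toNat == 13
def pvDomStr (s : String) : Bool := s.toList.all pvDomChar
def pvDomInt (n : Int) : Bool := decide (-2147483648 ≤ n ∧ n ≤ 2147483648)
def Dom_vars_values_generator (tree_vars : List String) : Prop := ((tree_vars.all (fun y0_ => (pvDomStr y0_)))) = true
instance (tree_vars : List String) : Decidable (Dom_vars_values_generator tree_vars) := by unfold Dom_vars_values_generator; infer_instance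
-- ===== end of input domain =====

-- B replaces A's full rewrite of the shared dict per counter value by flipping only
-- the trailing bits that change between consecutive counter values (alternative rewrite: amortized O(1) dict writes per step).
-- Both Pythons are generators that yield ONE shared dict; the equivalence proved here is about
-- the materialized result list(vars_values_generator(tv)), whose entries all alias the dict's
-- final state — the ports model exactly that.

-- ===== PORT A =====
-- 'while vals < end: ...; vals += 1' with vals starting at 0 is the fold over range(end);
-- '1 << i' is ported as 2 ^ i.toNat, exact since i ≥ 0 here.
def vars_values_generator (tree_vars : List String) : List (List (String × Int)) :=
  let endv : Int := 2 ^ tree_vars.length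
  let final : PySem.Dict String Int :=
    (PySem.List.pyRange 0 endv 1).foldl (fun result vals =>
      (PySem.List.pyRange 0 (tree_vars.length : Int) 1).foldl (fun result i =>
        if PySem.Int.band vals (2 ^ i.toNat) > 0 then
          result.insert (PySem.List.pyGetD tree_vars i "") 1
        else
          result.insert (PySem.List.pyGetD tree_vars i "") 0) result)
      PySem.Dict.empty
  -- every yield is a reference to the single dict: list(...) holds 2^n copies of its final items
  List.replicate endv.toNat final.items

-- ===== PORT B =====
def vars_values_generator_alt (tree_vars : List String) : List (List (String × Int)) :=
  let n := tree_vars.length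
  let init : PySem.Dict String Int :=
    tree_vars.foldl (fun d v => d.insert v 0) PySem.Dict.empty
  let final : PySem.Dict String Int :=
    (PySem.List.pyRange 1 ((2 : Int) ^ n) 1).foldl (fun result vals =>
      let i : Int := (PySem.Int.bitLength (PySem.Int.bxor vals (vals - 1)) : Int) - 1
      let result := (PySem.List.pyRange 0 i 1).foldl
        (fun r j => r.insert (PySem.List.pyGetD tree_vars j "") 0) result
      result.insert (PySem.List.pyGetD tree_vars i "") 1) init
  -- 1 + (2^n - 1) yields of the single shared dict
  List.replicate (2 ^ n) final.items

-- ===== PRECONDITION & SPEC =====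
def Spec_vars_values_generator (tree_vars : List String) (out : List (List (String × Int))) : Prop := out = vars_values_generator_alt tree_vars
instance (tree_vars : List String) (out : List (List (String × Int))) : Decidable (Spec_vars_values_generator tree_vars out) := by unfold Spec_vars_values_generator; infer_instance

-- ===== CLAIM (what is proved, stated in full; the proofs are below) =====
def Claim_equal_vars_values_generator : Prop := ∀ (tree_vars : List String), Dom_vars_values_generator tree_vars → Spec_vars_values_generator tree_vars (vars_values_generator tree_vars)

-- ===== LEMMAS AND PROOFS =====

-- ── arithmetic on bits ──
theorem pv_div2_xor (a b : Nat) : (a ^^^ b) / 2 = (a / 2) ^^^ (b / 2) := by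
  simpa [Nat.shiftRight_succ, Nat.shiftRight_eq_div_pow] using
    (Nat.shiftRight_xor_distrib (a := a) (b := b) (i := 1))

theorem pv_two_pow_xor_eq_add : ∀ (m a : Nat), a < 2 ^ m → 2 ^ m ^^^ a = 2 ^ m + a := by
  intro m
  induction m with
  | zero => intro a ha; interval_cases a; decide
  | succ m ih =>
    intro a ha
    have h2 : a / 2 < 2 ^ m := by omega
    have hx : (2 ^ (m + 1) ^^^ a) / 2 = 2 ^ m + a / 2 := by
      rw [pv_div2_xor]
      have : 2 ^ (m + 1) / 2 = 2 ^ m := by omega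
      rw [this, ih _ h2]
    have hm : (2 ^ (m + 1) ^^^ a) % 2 = (2 ^ (m + 1) + a) % 2 := Nat.xor_mod_two_eq
    omega

theorem pv_xor_pred_shift (m k : Nat) (h1 : 1 ≤ k) (h2 : k < 2 ^ m) :
    ((2 ^ m + k) ^^^ (2 ^ m + k - 1)) = (k ^^^ (k - 1)) := by
  have e1 : 2 ^ m + k = 2 ^ m ^^^ k := (pv_two_pow_xor_eq_add m k h2).symm
  have e2 : 2 ^ m + k - 1 = 2 ^ m ^^^ (k - 1) := by
    have : 2 ^ m + k - 1 = 2 ^ m + (k - 1) := by omega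
    rw [this, pv_two_pow_xor_eq_add m (k - 1) (by omega)]
  rw [e2, e1, Nat.xor_assoc, Nat.xor_comm k, Nat.xor_assoc, Nat.xor_xor_cancel_left]
  exact Nat.xor_comm _ _

theorem pv_xor_pow_pred (m : Nat) : (2 ^ m) ^^^ (2 ^ m - 1) = 2 ^ (m + 1) - 1 := by
  have hp : 1 ≤ 2 ^ m := Nat.one_le_two_pow
  rw [pv_two_pow_xor_eq_add m (2 ^ m - 1) (by omega)]
  have h : 2 ^ (m + 1) = 2 * 2 ^ m := by ring
  omega

theorem pv_bl_pow_sub_one : ∀ m : Nat, PySem.Int.bitLength (((2 ^ (m + 1) - 1 : Nat) : Int)) = m + 1 := by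
  intro m
  induction m with
  | zero =>
    show PySem.Int.bitLength ((1 : Nat) : Int) = 1
    rw [PySem.Int.bitLength_natCast (m := 1) (by omega)]
    norm_num [PySem.Int.bitLength_zero]
  | succ m ih =>
    have hp : 1 ≤ 2 ^ (m + 1 + 1) := Nat.one_le_two_pow
    rw [PySem.Int.bitLength_natCast (by omega)]
    have : (2 ^ (m + 1 + 1) - 1) / 2 = 2 ^ (m + 1) - 1 := by omega
    rw [this, ih]

-- ── generic dict-fold facts ──
theorem pv_contains_fold_mono {β : Type} (l : List β)
    (F : PySem.Dict String Int → β → PySem.Dict String Int)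
    (h : ∀ d x k, d.contains k = true → (F d x).contains k = true) :
    ∀ (d : PySem.Dict String Int) (k : String), d.contains k = true → (l.foldl F d).contains k = true := by
  induction l with
  | nil => intro d k hk; simpa using hk
  | cons x l ih => intro d k hk; exact ih (F d x) k (h d x k hk)

theorem pv_items_insConst (c : Int) : ∀ (l : List String) (d : PySem.Dict String Int),
    (∀ v ∈ l, d.contains v = true) →
    (l.foldl (fun d v => d.insert v c) d).items
      = d.items.map (fun p => if p.1 ∈ l then (p.1, c) else p) := by
  intro l
  induction l with
  | nil => intro d _; simp
  | cons v l ih =>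
    intro d hc
    have hv : d.contains v = true := hc v (by simp)
    have h2 : ∀ w ∈ l, (d.insert v c).contains w = true := by
      intro w hw
      rw [PySem.Dict.contains_insert]
      simp [hc w (by simp [hw])]
    calc ((v :: l).foldl (fun d v => d.insert v c) d).items
        = (l.foldl (fun d v => d.insert v c) (d.insert v c)).items := by simp
      _ = (d.insert v c).items.map (fun p => if p.1 ∈ l then (p.1, c) else p) := ih _ h2
      _ = (d.items.map (fun p => if (p.1 == v) = true then (v, c) else p)).map
            (fun p => if p.1 ∈ l then (p.1, c) else p) := by
            rw [PySem.Dict.items_insert_of_contains d c hv]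
      _ = d.items.map (fun p => if p.1 ∈ v :: l then (p.1, c) else p) := by
            rw [List.map_map]
            refine List.map_congr_left ?_
            intro p _
            by_cases hpv : p.1 = v
            · simp [hpv]
            · simp [hpv, Function.comp]
  -- (the `==` on String is lawful: `p.1 == v` decides `p.1 = v`)

theorem pv_pyRange_shift (a b c : Int) :
    PySem.List.pyRange (a + c) (b + c) 1 = (PySem.List.pyRange a b 1).map (· + c) := by
  rw [PySem.List.pyRange_one, PySem.List.pyRange_one, List.map_map]
  have hd : (b + c - (a + c)).toNat = (b - a).toNat := by omega
  rw [hd]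
  refine List.map_congr_left ?_
  intro k _
  simp [Function.comp]
  ring

-- ── B's loop body as a named function (definitionally the port's lambda) ──
def pvStepB (tv : List String) (result : PySem.Dict String Int) (vals : Int) : PySem.Dict String Int :=
  let i : Int := (PySem.Int.bitLength (PySem.Int.bxor vals (vals - 1)) : Int) - 1
  let result := (PySem.List.pyRange 0 i 1).foldl
    (fun r j => r.insert (PySem.List.pyGetD tv j "") 0) result
  result.insert (PySem.List.pyGetD tv i "") 1

def pvInitB (tv : List String) : PySem.Dict String Int :=
  tv.foldl (fun d v => d.insert v 0) PySem.Dict.empty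

theorem pv_alt_eq (tv : List String) :
    vars_values_generator_alt tv = List.replicate (2 ^ tv.length)
      (((PySem.List.pyRange 1 ((2 : Int) ^ tv.length) 1).foldl (pvStepB tv) (pvInitB tv)).items) := rfl

theorem pv_contains_stepB (tv : List String) (d : PySem.Dict String Int) (vals : Int) (k : String)
    (hk : d.contains k = true) : (pvStepB tv d vals).contains k = true := by
  unfold pvStepB
  have h1 := pv_contains_fold_mono
    (l := PySem.List.pyRange 0 ((PySem.Int.bitLength (PySem.Int.bxor vals (vals - 1)) : Int) - 1) 1)
    (F := fun r j => r.insert (PySem.List.pyGetD tv j "") 0)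
    (fun d x k hk => by rw [PySem.Dict.contains_insert]; simp [hk]) d k hk
  rw [PySem.Dict.contains_insert]; simp [h1]

theorem pv_stepB_shift (tv : List String) (d : PySem.Dict String Int) (m : Nat) (v : Int)
    (h1 : 1 ≤ v) (h2 : v < (2 : Int) ^ m) :
    pvStepB tv d (v + (2 : Int) ^ m) = pvStepB tv d v := by
  have hk : v = ((v.toNat : Nat) : Int) := by omega
  set k : Nat := v.toNat with hkdef
  have hcast : ((2 : Int) ^ m) = ((2 ^ m : Nat) : Int) := by push_cast; ring
  have hk1 : 1 ≤ k := by omega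
  have hk2 : k < 2 ^ m := by
    have := h2; rw [hcast] at this; omega
  have hbx : PySem.Int.bxor (v + (2 : Int) ^ m) (v + (2 : Int) ^ m - 1)
      = PySem.Int.bxor v (v - 1) := by
    rw [hk, hcast]
    have e1 : ((k : Int) + (2 ^ m : Nat)) = (((k + 2 ^ m : Nat) : Int)) := by push_cast; ring
    have e2 : ((k : Int) + (2 ^ m : Nat) - 1) = (((k + 2 ^ m - 1 : Nat) : Int)) := by push_cast [Nat.one_le_two_pow]; omega
    have e3 : ((k : Int) - 1) = (((k - 1 : Nat) : Int)) := by omega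
    rw [e1]
    rw [show ((k + 2 ^ m : Nat) : Int) - 1 = (((k + 2 ^ m - 1 : Nat) : Int)) from by push_cast [Nat.one_le_two_pow]; omega]
    rw [e3, PySem.Int.bxor_natCast, PySem.Int.bxor_natCast]
    have : (k + 2 ^ m) ^^^ (k + 2 ^ m - 1) = k ^^^ (k - 1) := by
      have h := pv_xor_pred_shift m k hk1 hk2
      have c1 : k + 2 ^ m = 2 ^ m + k := by omega
      rw [c1, h]
    rw [this]
  unfold pvStepB
  rw [hbx]

-- items of the B-loop over range(1, 2^m): exactly the keys among the first m variables are set to 1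
theorem pv_itemsG : ∀ (m : Nat) (tv : List String) (d : PySem.Dict String Int),
    m ≤ tv.length → (∀ v ∈ tv, d.contains v = true) →
    ((PySem.List.pyRange 1 ((2 : Int) ^ m) 1).foldl (pvStepB tv) d).items
      = d.items.map (fun p => if p.1 ∈ tv.take m then (p.1, (1 : Int)) else p) := by
  intro m
  induction m with
  | zero =>
    intro tv d _ _
    rw [PySem.List.pyRange_one_eq_nil (by norm_num)]
    simp
  | succ m ih =>
    intro tv d hm hc
    have hml : m ≤ tv.length := by omega
    have hmlt : m < tv.length := by omega
    have hcast : ((2 : Int) ^ m) = ((2 ^ m : Nat) : Int) := by push_cast; ring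
    have hpos : (1 : Int) ≤ (2 : Int) ^ m := by rw [hcast]; exact_mod_cast Nat.one_le_two_pow
    have hdouble : ((2 : Int) ^ (m + 1)) = (2 : Int) ^ m + (2 : Int) ^ m := by ring
    -- split range(1, 2^(m+1)) into range(1, 2^m), [2^m], and a shifted copy of range(1, 2^m)
    have hsplit : PySem.List.pyRange 1 ((2 : Int) ^ (m + 1)) 1 =
        PySem.List.pyRange 1 ((2 : Int) ^ m) 1 ++
          ((2 : Int) ^ m :: (PySem.List.pyRange 1 ((2 : Int) ^ m) 1).map (· + (2 : Int) ^ m)) := by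
      rw [PySem.List.pyRange_one_append 1 ((2 : Int) ^ m) ((2 : Int) ^ (m + 1)) hpos (by linarith)]
      congr 1
      rw [PySem.List.pyRange_one_cons (by linarith)]
      congr 1
      rw [← pv_pyRange_shift 1 ((2 : Int) ^ m) ((2 : Int) ^ m)]
      rw [hdouble]
      ring_nf
    rw [hsplit, List.foldl_append, List.foldl_cons, List.foldl_map]
    rw [PySem.List.foldl_congr_mem _ _ (pvStepB tv) _ (by
      intro acc v hv
      rw [PySem.List.mem_pyRange_one] at hv
      exact pv_stepB_shift tv acc m v hv.1 hv.2)]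
    -- the middle step at vals = 2^m flips variable m on and variables 0..m-1 off
    have hi : ((PySem.Int.bitLength (PySem.Int.bxor ((2 : Int) ^ m) ((2 : Int) ^ m - 1)) : Nat) : Int) - 1 = (m : Int) := by
      rw [hcast]
      rw [show ((2 ^ m : Nat) : Int) - 1 = ((2 ^ m - 1 : Nat) : Int) from by
        have := Nat.one_le_two_pow (n := m); push_cast [this]; omega]
      rw [PySem.Int.bxor_natCast, pv_xor_pow_pred, pv_bl_pow_sub_one]
      push_cast; ring
    have hzeros : ∀ (X : PySem.Dict String Int),
        (PySem.List.pyRange 0 (m : Int) 1).foldl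
          (fun r j => r.insert (PySem.List.pyGetD tv j "") 0) X
        = (tv.take m).foldl (fun r v => r.insert v 0) X := by
      intro X
      have hlen : (((tv.take m).length : Nat) : Int) = (m : Int) := by
        simp [List.length_take, Nat.min_eq_left hml]
      rw [← hlen,
        PySem.List.foldl_congr_mem _ _
          (fun acc j => acc.insert (PySem.List.pyGetD (tv.take m) j "") 0) _ (by
            intro acc j hj
            rw [PySem.List.mem_pyRange_one] at hj
            have h0 : (0 : Int) ≤ j := hj.1
            have hjm : j.toNat < m := by
              have := hj.2; rw [hlen] at this; omega
            simp only [PySem.List.pyGetD_of_nonneg _ _ h0]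
            simp [List.getD_eq_getElem?_getD, hjm]),
        PySem.List.foldl_pyRange_zero_pyGetD' (tv.take m) "" (fun r v => r.insert v 0) X]
    have hstep : ∀ (X : PySem.Dict String Int), pvStepB tv X ((2 : Int) ^ m) =
        ((tv.take m).foldl (fun r v => r.insert v 0) X).insert (tv.getD m "") 1 := by
      intro X
      show (((PySem.List.pyRange 0 ((PySem.Int.bitLength (PySem.Int.bxor ((2 : Int) ^ m) ((2 : Int) ^ m - 1)) : Nat) - 1 : Int) 1).foldl
          (fun r j => r.insert (PySem.List.pyGetD tv j "") 0) X).insert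
          (PySem.List.pyGetD tv ((PySem.Int.bitLength (PySem.Int.bxor ((2 : Int) ^ m) ((2 : Int) ^ m - 1)) : Nat) - 1) "") 1) = _
      rw [show ((PySem.Int.bitLength (PySem.Int.bxor ((2 : Int) ^ m) ((2 : Int) ^ m - 1)) : Nat) - 1 : Int) = (m : Int) from hi]
      rw [hzeros X, PySem.List.pyGetD_natCast]
    -- names for the intermediate dicts
    set X : PySem.Dict String Int :=
      (PySem.List.pyRange 1 ((2 : Int) ^ m) 1).foldl (pvStepB tv) d with hX
    have hcX : ∀ v ∈ tv, X.contains v = true := fun v hv =>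
      pv_contains_fold_mono _ (pvStepB tv)
        (fun d x k hk => pv_contains_stepB tv d x k hk) d v (hc v hv)
    set Z : PySem.Dict String Int := (tv.take m).foldl (fun r v => r.insert v 0) X with hZ
    have hcZ : ∀ v ∈ tv, Z.contains v = true := fun v hv =>
      pv_contains_fold_mono _ (fun r w => r.insert w 0)
        (fun d x k hk => by rw [PySem.Dict.contains_insert]; simp [hk]) X v (hcX v hv)
    have hkeymem : tv.getD m "" ∈ tv := by
      rw [List.getD_eq_getElem tv "" hmlt]
      exact List.getElem_mem hmlt
    have hcZ' : ∀ v ∈ tv, (Z.insert (tv.getD m "") 1).contains v = true := fun v hv => by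
      rw [PySem.Dict.contains_insert]; simp [hcZ v hv]
    rw [hstep X, ← hZ]
    rw [ih tv (Z.insert (tv.getD m "") 1) hml hcZ']
    rw [PySem.Dict.items_insert_of_contains Z 1 (hcZ _ hkeymem)]
    rw [show Z.items = X.items.map (fun p => if p.1 ∈ tv.take m then (p.1, (0 : Int)) else p) from
      pv_items_insConst 0 (tv.take m) X (fun v hv => hcX v (List.mem_of_mem_take hv))]
    rw [ih tv d hml hc]
    rw [List.map_map, List.map_map, List.map_map]
    refine List.map_congr_left ?_
    intro p _
    have htake : tv.take (m + 1) = tv.take m ++ [tv[m]] := List.take_succ_eq_append_getElem hmlt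
    have hgd : tv.getD m "" = tv[m] := List.getD_eq_getElem tv "" hmlt
    simp only [Function.comp_apply, htake, hgd, List.mem_append, List.mem_singleton, beq_iff_eq]
    by_cases h1 : p.1 ∈ List.take m tv
    · by_cases h2 : p.1 = tv[m]
      · simp only [← h2]; simp [h1]
      · simp [h1, h2]
    · by_cases h2 : p.1 = tv[m]
      · simp only [← h2]; simp [h1]
      · simp [h1, h2]

-- ── A's loop body as a named function (definitionally the port's lambda) ──
def pvPassA (tv : List String) (result : PySem.Dict String Int) (vals : Int) : PySem.Dict String Int :=
  (PySem.List.pyRange 0 (tv.length : Int) 1).foldl (fun result i =>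
    if PySem.Int.band vals (2 ^ i.toNat) > 0 then
      result.insert (PySem.List.pyGetD tv i "") 1
    else
      result.insert (PySem.List.pyGetD tv i "") 0) result

theorem pv_a_eq (tv : List String) :
    vars_values_generator tv = List.replicate ((2 : Int) ^ tv.length).toNat
      (((PySem.List.pyRange 0 ((2 : Int) ^ tv.length) 1).foldl (pvPassA tv) PySem.Dict.empty).items) := rfl

theorem pv_keys_passA (tv : List String) (d : PySem.Dict String Int) (vals : Int) :
    (pvPassA tv d vals).keys = PySem.Set.update d.keys tv := by
  unfold pvPassA
  rw [PySem.List.foldl_congr_mem _ _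
    (fun result i => result.insert (PySem.List.pyGetD tv i "")
      ((fun (_ : PySem.Dict String Int) (i : Int) =>
        if PySem.Int.band vals (2 ^ i.toNat) > 0 then (1 : Int) else 0) result i)) _ (by
      intro acc x _
      by_cases h : PySem.Int.band vals (2 ^ x.toNat) > 0 <;> simp [h])]
  rw [PySem.Dict.keys_foldl_insert_key _ (fun i => PySem.List.pyGetD tv i "") _ d]
  rw [PySem.List.map_pyGetD_pyRange_zero']

theorem pv_items_lastA (tv : List String) (d : PySem.Dict String Int)
    (hc : ∀ v ∈ tv, d.contains v = true) :
    (pvPassA tv d (((2 ^ tv.length - 1 : Nat)) : Int)).items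
      = d.items.map (fun p => if p.1 ∈ tv then (p.1, (1 : Int)) else p) := by
  unfold pvPassA
  rw [PySem.List.foldl_congr_mem _ _
    (fun result i => result.insert (PySem.List.pyGetD tv i "") 1) _ (by
      intro acc i hi
      rw [PySem.List.mem_pyRange_one] at hi
      have hlt : i.toNat < tv.length := by omega
      have hmask : ((2 : Int) ^ i.toNat) = ((2 ^ i.toNat : Nat) : Int) := by push_cast; ring
      have hcond : PySem.Int.band ((2 ^ tv.length - 1 : Nat) : Int) ((2 : Int) ^ i.toNat) > 0 := by
        rw [hmask, PySem.Int.band_natCast, Nat.and_two_pow, Nat.testBit_two_pow_sub_one]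
        simp [hlt]
      rw [if_pos hcond])]
  rw [PySem.List.foldl_pyRange_zero_pyGetD' tv "" (fun r v => r.insert v 1) d]
  exact pv_items_insConst 1 tv d hc

theorem pv_update_fix (tv : List String) :
    PySem.Set.update (PySem.Set.update ([] : List String) tv) tv
      = PySem.Set.update ([] : List String) tv := by
  rw [PySem.Set.update_eq_append_filter (PySem.Set.update [] tv) tv]
  have hnil : List.filter (fun y => !(PySem.Set.update ([] : List String) tv).contains y)
      (PySem.Set.ofList tv) = [] := by
    rw [List.filter_eq_nil_iff]
    intro y hy
    have hytv : y ∈ tv := by simpa [PySem.Set.mem_ofList] using hy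
    simp [hytv]
  rw [hnil, List.append_nil]

theorem pv_keys_foldA (tv : List String) : ∀ (L : List Int) (d : PySem.Dict String Int),
    d.keys = PySem.Set.update [] tv →
    (L.foldl (pvPassA tv) d).keys = PySem.Set.update [] tv := by
  intro L
  induction L with
  | nil => intro d hd; simpa using hd
  | cons v L ih =>
    intro d hd
    rw [List.foldl_cons]
    exact ih _ (by rw [pv_keys_passA, hd, pv_update_fix])

theorem pv_itemsA_final (tv : List String) (h : 1 ≤ tv.length) :
    ((PySem.List.pyRange 0 ((2 : Int) ^ tv.length) 1).foldl (pvPassA tv) PySem.Dict.empty).items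
      = (PySem.Set.update ([] : List String) tv).map (fun k => (k, (1 : Int))) := by
  have h2 : 2 ≤ 2 ^ tv.length := by
    calc 2 = 2 ^ 1 := rfl
    _ ≤ 2 ^ tv.length := Nat.pow_le_pow_right (by omega) h
  have hE : ((2 : Int) ^ tv.length) = ((2 ^ tv.length - 1 : Nat) : Int) + 1 := by
    rw [Nat.cast_sub (by omega)]; push_cast; ring
  rw [hE, PySem.List.pyRange_one_succ_right (by exact_mod_cast Nat.zero_le _), List.foldl_append]
  have hB0 : (0 : Int) < ((2 ^ tv.length - 1 : Nat) : Int) := by exact_mod_cast (by omega : 0 < 2 ^ tv.length - 1)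
  have hdprev : ((PySem.List.pyRange 0 ((2 ^ tv.length - 1 : Nat) : Int) 1).foldl (pvPassA tv) PySem.Dict.empty).keys
      = PySem.Set.update ([] : List String) tv := by
    rw [PySem.List.pyRange_one_cons hB0, List.foldl_cons]
    exact pv_keys_foldA tv _ _ (by rw [pv_keys_passA, PySem.Dict.keys_empty])
  set dprev : PySem.Dict String Int :=
    (PySem.List.pyRange 0 ((2 ^ tv.length - 1 : Nat) : Int) 1).foldl (pvPassA tv) PySem.Dict.empty with hdp
  have hcdprev : ∀ v ∈ tv, dprev.contains v = true := by
    intro v hv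
    rw [PySem.Dict.contains_iff_mem_keys, hdprev, PySem.Set.mem_update]
    exact Or.inr hv
  rw [List.foldl_cons, List.foldl_nil, pv_items_lastA tv dprev hcdprev]
  rw [PySem.Dict.items_eq_map_keys dprev (by rw [hdprev]; exact PySem.Set.nodup_update _ _ List.nodup_nil) 0]
  rw [hdprev, List.map_map]
  refine List.map_congr_left ?_
  intro k hk
  have hktv : k ∈ tv := by
    rcases (PySem.Set.mem_update _ _ _).1 hk with h' | h'
    · simp at h'
    · exact h'
  simp [Function.comp, hktv]

theorem pv_itemsB_final (tv : List String) :
    ((PySem.List.pyRange 1 ((2 : Int) ^ tv.length) 1).foldl (pvStepB tv) (pvInitB tv)).items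
      = (PySem.Set.update ([] : List String) tv).map (fun k => (k, (1 : Int))) := by
  have hkeys : (pvInitB tv).keys = PySem.Set.update ([] : List String) tv := by
    unfold pvInitB
    rw [PySem.Dict.keys_foldl_insert tv (fun _ _ => 0) PySem.Dict.empty, PySem.Dict.keys_empty]
  have hc : ∀ v ∈ tv, (pvInitB tv).contains v = true := by
    intro v hv
    rw [PySem.Dict.contains_iff_mem_keys, hkeys, PySem.Set.mem_update]
    exact Or.inr hv
  rw [pv_itemsG tv.length tv (pvInitB tv) le_rfl hc, List.take_length]
  rw [PySem.Dict.items_eq_map_keys (pvInitB tv) (by rw [hkeys]; exact PySem.Set.nodup_update _ _ List.nodup_nil) 0]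
  rw [hkeys, List.map_map]
  refine List.map_congr_left ?_
  intro k hk
  have hktv : k ∈ tv := by
    rcases (PySem.Set.mem_update _ _ _).1 hk with h' | h'
    · simp at h'
    · exact h'
  simp [Function.comp, hktv]

-- ===== VERDICT (by name: the statement is the Claim_ definition above) =====
theorem vars_values_generator_spec : Claim_equal_vars_values_generator := by
  intro tv _
  unfold Spec_vars_values_generator
  cases tv with
  | nil => decide
  | cons v rest =>
    rw [pv_a_eq, pv_alt_eq]
    have hlen : 1 ≤ (v :: rest).length := by simp
    rw [pv_itemsA_final _ hlen, pv_itemsB_final]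
    have hcnt : ((2 : Int) ^ (v :: rest).length).toNat = 2 ^ (v :: rest).length := by
      rw [show ((2 : Int) ^ (v :: rest).length) = ((2 ^ (v :: rest).length : Nat) : Int) from by push_cast; ring,
        Int.toNat_natCast]
    rw [hcnt]
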